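-- pv_equiv track=rewrite | github.com/karl-akuoko/Qualcomm_Hackathon | reroute/server/fastapi_manhattan_grid_routes.py | find_grid_route
-- ===== SOURCE A (Python) =====
-- from typing import Dict, List, Any, Optional, Tuple
--
-- def find_grid_route(start: Tuple[int, int], end: Tuple[int, int]) -> List[Tuple[int, int]]:
--     """Find route following Manhattan grid"""
--     start_x, start_y = start
--     end_x, end_y = end
--
--     route = [start]
--     current_x, current_y = start_x, start_y
--
--     # Manhattan routing: go to nearest avenue, then to destination avenue, then to destination
--     # Step 1: Move to nearest avenue (snap to grid)
--     nearest_avenue_x = round(current_x / 5) * 5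
--     if current_x != nearest_avenue_x:
--         # Move horizontally to avenue
--         while current_x != nearest_avenue_x:
--             if current_x < nearest_avenue_x:
--                 current_x += 1
--             else:
--                 current_x -= 1
--             route.append((current_x, current_y))
--
--     # Step 2: Move to destination avenue
--     dest_avenue_x = round(end_x / 5) * 5
--     if current_x != dest_avenue_x:
--         # Move horizontally to destination avenue
--         while current_x != dest_avenue_x:
--             if current_x < dest_avenue_x:
--                 current_x += 1
--             else:
--                 current_x -= 1
--             route.append((current_x, current_y))
--
--     # Step 3: Move to destination street
--     nearest_street_y = round(current_y / 5) * 5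
--     if current_y != nearest_street_y:
--         # Move vertically to street
--         while current_y != nearest_street_y:
--             if current_y < nearest_street_y:
--                 current_y += 1
--             else:
--                 current_y -= 1
--             route.append((current_x, current_y))
--
--     # Step 4: Move to destination
--     while current_y != end_y:
--         if current_y < end_y:
--             current_y += 1
--         else:
--             current_y -= 1
--         route.append((current_x, current_y))
--
--     while current_x != end_x:
--         if current_x < end_x:
--             current_x += 1
--         else:
--             current_x -= 1
--         route.append((current_x, current_y))
--
--     return route
-- ===== SOURCE B (Python) =====
-- from typing import List, Tuple
--
--
-- def _sgn(v: int) -> int: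
--     return 1 if v > 0 else (-1 if v < 0 else 0)
--
--
-- def find_grid_route(start: Tuple[int, int], end: Tuple[int, int]) -> List[Tuple[int, int]]:
--     """Find route following Manhattan grid (closed-form: i-th point computed from its index)"""
--     sx, sy = start
--     ex, ey = end
--     a1 = round(sx / 5) * 5
--     a2 = round(ex / 5) * 5
--     s1 = round(sy / 5) * 5
--     d1 = abs(a1 - sx)
--     d2 = abs(a2 - a1)
--     d3 = abs(s1 - sy)
--     d4 = abs(ey - s1)
--     d5 = abs(ex - a2)
--     g1, g2, g3, g4, g5 = _sgn(a1 - sx), _sgn(a2 - a1), _sgn(s1 - sy), _sgn(ey - s1), _sgn(ex - a2)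
--
--     def point_at(i: int) -> Tuple[int, int]:
--         if i <= d1:
--             return (sx + g1 * i, sy)
--         i -= d1
--         if i <= d2:
--             return (a1 + g2 * i, sy)
--         i -= d2
--         if i <= d3:
--             return (a2, sy + g3 * i)
--         i -= d3
--         if i <= d4:
--             return (a2, s1 + g4 * i)
--         i -= d4
--         return (a2 + g5 * i, ey)
--
--     total = d1 + d2 + d3 + d4 + d5
--     return [point_at(i) for i in range(total + 1)]
-- ===== Notes on version B (the rewrite author's own statement) =====
-- stated objective: alternative
-- what changed: Replaces A's five sequential mutate-and-append while-loops by a closed-form indexing scheme: compute the five segment lengths and directions up front and generate the i-th route point directly from its global index with one arithmetic function mapped over range(total+1).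
import Mathlib
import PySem

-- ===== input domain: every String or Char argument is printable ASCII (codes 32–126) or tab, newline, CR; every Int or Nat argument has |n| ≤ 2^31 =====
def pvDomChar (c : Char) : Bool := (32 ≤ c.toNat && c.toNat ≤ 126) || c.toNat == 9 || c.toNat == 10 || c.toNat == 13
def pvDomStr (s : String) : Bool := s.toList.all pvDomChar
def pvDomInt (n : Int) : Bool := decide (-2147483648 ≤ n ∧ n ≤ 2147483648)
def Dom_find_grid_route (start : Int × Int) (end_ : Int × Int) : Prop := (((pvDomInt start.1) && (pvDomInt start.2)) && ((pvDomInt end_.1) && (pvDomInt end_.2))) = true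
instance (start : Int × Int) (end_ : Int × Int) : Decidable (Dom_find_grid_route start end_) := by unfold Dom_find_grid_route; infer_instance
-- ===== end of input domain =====

-- B replaces A's five sequential unit-step while-loops by a closed-form function that
-- computes the i-th route point directly from its index (objective: alternative; same cost).

-- ===== PORT A =====
-- Python's round(v / 5) * 5 on an int v: exact integer form, nearest multiple of 5.
-- Exact on |v| ≤ 2^31: v/5 is never a float half-integer there, so banker's tie-breaking never fires.
def pyRound5A (v : Int) : Int := 5 * PySem.Int.floordiv (v + 2) 5

-- one of A's horizontal while-loops: step current_x toward tx, appending (x, cy) each step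
def walkXA (cy tx cx : Int) : List (Int × Int) :=
  if _h : cx = tx then []
  else
    let cx' := if cx < tx then cx + 1 else cx - 1
    (cx', cy) :: walkXA cy tx cx'
termination_by (tx - cx).natAbs
decreasing_by split <;> omega

-- one of A's vertical while-loops: step current_y toward ty, appending (cx, y) each step
def walkYA (cx ty cy : Int) : List (Int × Int) :=
  if _h : cy = ty then []
  else
    let cy' := if cy < ty then cy + 1 else cy - 1
    (cx, cy') :: walkYA cx ty cy'
termination_by (ty - cy).natAbs
decreasing_by split <;> omega

def find_grid_route (start : Int × Int) (end_ : Int × Int) : List (Int × Int) :=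
  let start_x := start.1; let start_y := start.2
  let end_x := end_.1; let end_y := end_.2
  -- A's 'if current != target:' guards around the first three loops repeat each loop's own
  -- condition, so each guarded while is transliterated as the loop alone.
  let nearest_avenue_x := pyRound5A start_x
  let r1 := walkXA start_y nearest_avenue_x start_x              -- Step 1; current_x = nearest_avenue_x after
  let dest_avenue_x := pyRound5A end_x
  let r2 := walkXA start_y dest_avenue_x nearest_avenue_x       -- Step 2; current_x = dest_avenue_x after
  let nearest_street_y := pyRound5A start_y
  let r3 := walkYA dest_avenue_x nearest_street_y start_y       -- Step 3; current_y = nearest_street_y after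
  let r4 := walkYA dest_avenue_x end_y nearest_street_y         -- Step 4 (vertical)
  let r5 := walkXA end_y end_x dest_avenue_x                    -- Step 4 (horizontal)
  [start] ++ r1 ++ r2 ++ r3 ++ r4 ++ r5

-- ===== PORT B =====
-- B's _sgn helper
def sgnB (v : Int) : Int := if 0 < v then 1 else if v < 0 then -1 else 0

-- B's point_at closure: the i-th route point, computed from global index i by peeling
-- segment lengths d1..d4 off i and applying the remaining offset in the right direction.
def pointAtB (sx sy a1 a2 s1 ey d1 d2 d3 d4 g1 g2 g3 g4 g5 i : Int) : Int × Int :=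
  if i ≤ d1 then (sx + g1 * i, sy)
  else
    let i1 := i - d1
    if i1 ≤ d2 then (a1 + g2 * i1, sy)
    else
      let i2 := i1 - d2
      if i2 ≤ d3 then (a2, sy + g3 * i2)
      else
        let i3 := i2 - d3
        if i3 ≤ d4 then (a2, s1 + g4 * i3)
        else
          let i4 := i3 - d4
          (a2 + g5 * i4, ey)

def find_grid_route_alt (start : Int × Int) (end_ : Int × Int) : List (Int × Int) :=
  let sx := start.1; let sy := start.2
  let ex := end_.1; let ey := end_.2
  -- round(v/5)*5: same exact integer form as in A's port (no float ties on |v| ≤ 2^31)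
  let a1 := 5 * PySem.Int.floordiv (sx + 2) 5
  let a2 := 5 * PySem.Int.floordiv (ex + 2) 5
  let s1 := 5 * PySem.Int.floordiv (sy + 2) 5
  let d1 := |a1 - sx|; let d2 := |a2 - a1|; let d3 := |s1 - sy|
  let d4 := |ey - s1|; let d5 := |ex - a2|
  let g1 := sgnB (a1 - sx); let g2 := sgnB (a2 - a1); let g3 := sgnB (s1 - sy)
  let g4 := sgnB (ey - s1); let g5 := sgnB (ex - a2)
  let total := d1 + d2 + d3 + d4 + d5
  (PySem.List.pyRange 0 (total + 1) 1).map
    (pointAtB sx sy a1 a2 s1 ey d1 d2 d3 d4 g1 g2 g3 g4 g5)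

-- ===== PRECONDITION & SPEC =====
def Spec_find_grid_route (start : Int × Int) (end_ : Int × Int) (out : List (Int × Int)) : Prop := out = find_grid_route_alt start end_
instance (start : Int × Int) (end_ : Int × Int) (out : List (Int × Int)) : Decidable (Spec_find_grid_route start end_ out) := by unfold Spec_find_grid_route; infer_instance

-- ===== CLAIM (what is proved, stated in full; the proofs are below) =====
def Claim_equal_find_grid_route : Prop := ∀ (start : Int × Int) (end_ : Int × Int), Dom_find_grid_route start end_ → Spec_find_grid_route start end_ (find_grid_route start end_)

-- ===== LEMMAS AND PROOFS =====

-- A's horizontal while-loop in closed form: |t-c| points, the k-th one sign-offset from c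
theorem walkXA_range (y : Int) : ∀ (n : Nat) (t c : Int), (t - c).natAbs = n →
    walkXA y t c = (List.range n).map (fun (k : Nat) => (c + sgnB (t - c) * ((k : Int) + 1), y)) := by
  intro n
  induction n with
  | zero =>
      intro t c hn
      have : c = t := by omega
      subst this
      rw [walkXA.eq_def]
      simp
  | succ m ih =>
      intro t c hn
      have hne : ¬ c = t := by omega
      rw [walkXA.eq_def]
      simp only [dif_neg hne]
      rw [List.range_succ_eq_map, List.map_cons, List.map_map]
      by_cases hlt : c < t
      · have hg : sgnB (t - c) = 1 := by unfold sgnB; rw [if_pos (by omega)]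
        rw [if_pos hlt, ih t (c + 1) (by omega), hg]
        refine List.cons_eq_cons.mpr ⟨by simp, ?_⟩
        refine List.map_congr_left (fun k hk => ?_)
        have hkm : k < m := List.mem_range.mp hk
        have hg' : sgnB (t - (c + 1)) = 1 := by unfold sgnB; rw [if_pos (by omega)]
        simp only [hg', Function.comp_apply, Prod.mk.injEq]
        push_cast
        constructor <;> first | trivial | ring
      · have hg : sgnB (t - c) = -1 := by
          unfold sgnB; rw [if_neg (by omega), if_pos (by omega)]
        rw [if_neg hlt, ih t (c - 1) (by omega), hg]
        refine List.cons_eq_cons.mpr ⟨by simp [Prod.ext_iff]; ring, ?_⟩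
        refine List.map_congr_left (fun k hk => ?_)
        have hkm : k < m := List.mem_range.mp hk
        have hg' : sgnB (t - (c - 1)) = -1 := by
          unfold sgnB; rw [if_neg (by omega), if_pos (by omega)]
        simp only [hg', Function.comp_apply, Prod.mk.injEq]
        push_cast
        constructor <;> first | trivial | ring

-- A's vertical while-loop in closed form (same argument, coordinates swapped)
theorem walkYA_range (x : Int) : ∀ (n : Nat) (t c : Int), (t - c).natAbs = n →
    walkYA x t c = (List.range n).map (fun (k : Nat) => (x, c + sgnB (t - c) * ((k : Int) + 1))) := by
  intro n
  induction n with
  | zero =>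
      intro t c hn
      have : c = t := by omega
      subst this
      rw [walkYA.eq_def]
      simp
  | succ m ih =>
      intro t c hn
      have hne : ¬ c = t := by omega
      rw [walkYA.eq_def]
      simp only [dif_neg hne]
      rw [List.range_succ_eq_map, List.map_cons, List.map_map]
      by_cases hlt : c < t
      · have hg : sgnB (t - c) = 1 := by unfold sgnB; rw [if_pos (by omega)]
        rw [if_pos hlt, ih t (c + 1) (by omega), hg]
        refine List.cons_eq_cons.mpr ⟨by simp, ?_⟩
        refine List.map_congr_left (fun k hk => ?_)
        have hkm : k < m := List.mem_range.mp hk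
        have hg' : sgnB (t - (c + 1)) = 1 := by unfold sgnB; rw [if_pos (by omega)]
        simp only [hg', Function.comp_apply, Prod.mk.injEq]
        push_cast
        constructor <;> first | trivial | ring
      · have hg : sgnB (t - c) = -1 := by
          unfold sgnB; rw [if_neg (by omega), if_pos (by omega)]
        rw [if_neg hlt, ih t (c - 1) (by omega), hg]
        refine List.cons_eq_cons.mpr ⟨by simp [Prod.ext_iff]; ring, ?_⟩
        refine List.map_congr_left (fun k hk => ?_)
        have hkm : k < m := List.mem_range.mp hk
        have hg' : sgnB (t - (c - 1)) = -1 := by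
          unfold sgnB; rw [if_neg (by omega), if_pos (by omega)]
        simp only [hg', Function.comp_apply, Prod.mk.injEq]
        push_cast
        constructor <;> first | trivial | ring

-- a B-side index range whose mapped values are given pointwise
theorem seg_map (P : Int → Int × Int) (f : Nat → Int × Int) (off : Int) (n : Nat)
    (h : ∀ k : Nat, k < n → P (off + k) = f k) :
    (PySem.List.pyRange off (off + n) 1).map P = (List.range n).map f := by
  rw [PySem.List.pyRange_one, List.map_map]
  have hn : (off + (n : Int) - off).toNat = n := by omega
  rw [hn]
  exact List.map_congr_left (fun k hk => h k (List.mem_range.mp hk))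

-- the route identity with the snapped coordinates generalized
theorem core (sx sy ex ey a1 a2 s1 : Int) :
    [((sx, sy) : Int × Int)] ++ walkXA sy a1 sx ++ walkXA sy a2 a1 ++ walkYA a2 s1 sy
      ++ walkYA a2 ey s1 ++ walkXA ey ex a2
    = (PySem.List.pyRange 0 ((|a1 - sx| + |a2 - a1| + |s1 - sy| + |ey - s1| + |ex - a2|) + 1) 1).map
        (pointAtB sx sy a1 a2 s1 ey (|a1 - sx|) (|a2 - a1|) (|s1 - sy|) (|ey - s1|)
          (sgnB (a1 - sx)) (sgnB (a2 - a1)) (sgnB (s1 - sy)) (sgnB (ey - s1)) (sgnB (ex - a2))) := by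
  have e1 : |a1 - sx| = ((a1 - sx).natAbs : Int) := Int.abs_eq_natAbs _
  have e2 : |a2 - a1| = ((a2 - a1).natAbs : Int) := Int.abs_eq_natAbs _
  have e3 : |s1 - sy| = ((s1 - sy).natAbs : Int) := Int.abs_eq_natAbs _
  have e4 : |ey - s1| = ((ey - s1).natAbs : Int) := Int.abs_eq_natAbs _
  have e5 : |ex - a2| = ((ex - a2).natAbs : Int) := Int.abs_eq_natAbs _
  set n1 := (a1 - sx).natAbs with hn1
  set n2 := (a2 - a1).natAbs with hn2
  set n3 := (s1 - sy).natAbs with hn3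
  set n4 := (ey - s1).natAbs with hn4
  set n5 := (ex - a2).natAbs with hn5
  rw [e1, e2, e3, e4, e5]
  set P := pointAtB sx sy a1 a2 s1 ey ((n1 : Int)) ((n2 : Int)) ((n3 : Int)) ((n4 : Int))
    (sgnB (a1 - sx)) (sgnB (a2 - a1)) (sgnB (s1 - sy)) (sgnB (ey - s1)) (sgnB (ex - a2)) with hP
  rw [show ((n1 : Int) + n2 + n3 + n4 + n5 + 1)
        = (1 + (n1 : Int) + n2 + n3 + n4) + (n5 : Int) by ring]
  rw [PySem.List.pyRange_one_append 0 1 ((1 + (n1 : Int) + n2 + n3 + n4) + (n5 : Int))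
        (by omega) (by omega)]
  rw [PySem.List.pyRange_one_append 1 (1 + (n1 : Int))
        ((1 + (n1 : Int) + n2 + n3 + n4) + (n5 : Int)) (by omega) (by omega)]
  rw [PySem.List.pyRange_one_append (1 + (n1 : Int)) (1 + (n1 : Int) + n2)
        ((1 + (n1 : Int) + n2 + n3 + n4) + (n5 : Int)) (by omega) (by omega)]
  rw [PySem.List.pyRange_one_append (1 + (n1 : Int) + n2) (1 + (n1 : Int) + n2 + n3)
        ((1 + (n1 : Int) + n2 + n3 + n4) + (n5 : Int)) (by omega) (by omega)]
  rw [PySem.List.pyRange_one_append (1 + (n1 : Int) + n2 + n3) (1 + (n1 : Int) + n2 + n3 + n4)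
        ((1 + (n1 : Int) + n2 + n3 + n4) + (n5 : Int)) (by omega) (by omega)]
  have hhead : (PySem.List.pyRange 0 1 1).map P = [(sx, sy)] := by
    have h01 : PySem.List.pyRange 0 1 1 = [0] := by decide
    rw [h01, List.map_singleton, hP]
    unfold pointAtB
    rw [if_pos (by omega)]
    simp
  have hseg1 : (PySem.List.pyRange 1 (1 + (n1 : Int)) 1).map P = walkXA sy a1 sx := by
    rw [walkXA_range sy n1 a1 sx rfl]
    exact seg_map P _ 1 n1 (fun k hk => by
      rw [hP]; unfold pointAtB
      rw [if_pos (by omega)]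
      simp only [Prod.mk.injEq]
      constructor <;> first | trivial | ring)
  have hseg2 : (PySem.List.pyRange (1 + (n1 : Int)) (1 + (n1 : Int) + n2) 1).map P
      = walkXA sy a2 a1 := by
    rw [walkXA_range sy n2 a2 a1 rfl]
    exact seg_map P _ (1 + (n1 : Int)) n2 (fun k hk => by
      rw [hP]; unfold pointAtB
      rw [if_neg (by omega), if_pos (by omega)]
      simp only [Prod.mk.injEq]
      constructor <;> first | trivial | ring)
  have hseg3 : (PySem.List.pyRange (1 + (n1 : Int) + n2) (1 + (n1 : Int) + n2 + n3) 1).map P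
      = walkYA a2 s1 sy := by
    rw [walkYA_range a2 n3 s1 sy rfl]
    exact seg_map P _ (1 + (n1 : Int) + n2) n3 (fun k hk => by
      rw [hP]; unfold pointAtB
      rw [if_neg (by omega), if_neg (by omega), if_pos (by omega)]
      simp only [Prod.mk.injEq]
      constructor <;> first | trivial | ring)
  have hseg4 : (PySem.List.pyRange (1 + (n1 : Int) + n2 + n3) (1 + (n1 : Int) + n2 + n3 + n4) 1).map P
      = walkYA a2 ey s1 := by
    rw [walkYA_range a2 n4 ey s1 rfl]
    exact seg_map P _ (1 + (n1 : Int) + n2 + n3) n4 (fun k hk => by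
      rw [hP]; unfold pointAtB
      rw [if_neg (by omega), if_neg (by omega), if_neg (by omega), if_pos (by omega)]
      simp only [Prod.mk.injEq]
      constructor <;> first | trivial | ring)
  have hseg5 : (PySem.List.pyRange (1 + (n1 : Int) + n2 + n3 + n4)
        ((1 + (n1 : Int) + n2 + n3 + n4) + (n5 : Int)) 1).map P = walkXA ey ex a2 := by
    rw [walkXA_range ey n5 ex a2 rfl]
    exact seg_map P _ (1 + (n1 : Int) + n2 + n3 + n4) n5 (fun k hk => by
      rw [hP]; unfold pointAtB
      rw [if_neg (by omega), if_neg (by omega), if_neg (by omega), if_neg (by omega)]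
      simp only [Prod.mk.injEq]
      constructor <;> first | trivial | ring)
  simp only [List.map_append, hhead, hseg1, hseg2, hseg3, hseg4, hseg5, List.append_assoc]

-- ===== VERDICT (by name: the statement is the Claim_ definition above) =====
theorem find_grid_route_spec : Claim_equal_find_grid_route := by
  intro start end_ _
  obtain ⟨sx, sy⟩ := start
  obtain ⟨ex, ey⟩ := end_
  show find_grid_route (sx, sy) (ex, ey) = find_grid_route_alt (sx, sy) (ex, ey)
  simp only [find_grid_route, find_grid_route_alt, pyRound5A]
  exact core sx sy ex ey (5 * PySem.Int.floordiv (sx + 2) 5) (5 * PySem.Int.floordiv (ex + 2) 5)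
    (5 * PySem.Int.floordiv (sy + 2) 5)
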